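-- pv_equiv track=rewrite | github.com/this-is-real/algorithm | exhaustive_search/카펫(42842)/김제우.py | solution
-- ===== SOURCE A (Python) =====
-- def solution(brown, yellow):
--     total = brown + yellow
--
--     #공약수 찾기 -> frame 만들기
--     frames = []
--     for i in range(3,total//2):
--         if total % i == 0 and i >= total//i:
--             frames.append((i,total//i))
--
--     answer = []
--     for width, height in frames:
--         brown_count = 0
--         for i in range(width//2):
--             brown_count += 2*(width-2*i) + 2*(height-2*i) - 4
--             if brown_count == brown and width*height-brown_count == yellow:
--                 answer.append(width)
--                 answer.append(height)
--
--     return answer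
-- ===== SOURCE B (Python) =====
-- def _isqrt(n):
--     # largest r with r*r <= n (n >= 0), by binary search: invariant lo*lo <= n < hi*hi
--     lo, hi = 0, n + 1
--     while hi - lo > 1:
--         mid = (lo + hi) // 2
--         if mid * mid <= n:
--             lo = mid
--         else:
--             hi = mid
--     return lo
--
--
-- def _ring_matches(brown, w, h):
--     # cumulative brown count of the first k rings of a w x h frame is 2*k*(w+h) - 4*k*k;
--     # it equals brown iff (4*k - s)**2 == s*s - 4*brown, so solve that quadratic exactly.
--     s = w + h
--     disc = s * s - 4 * brown
--     out = []
--     if disc >= 0: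
--         r = _isqrt(disc)
--         if r * r == disc:
--             for num in ([s - r, s + r] if r > 0 else [s - r]):
--                 if num % 4 == 0:
--                     k = num // 4
--                     if 1 <= k <= w // 2:
--                         out.append(w)
--                         out.append(h)
--     return out
--
--
-- def solution(brown, yellow):
--     total = brown + yellow
--     answer = []
--     if total < 1:
--         return answer
--     half = total // 2
--     j = _isqrt(total)
--     while j >= 1:                # widths w = total // j come out increasing as j decreases
--         if total % j == 0:
--             w = total // j
--             if 3 <= w < half:
--                 answer += _ring_matches(brown, w, j)
--         j -= 1
--     return answer
-- ===== Notes on version B (the rewrite author's own statement) =====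
-- stated objective: faster
-- what changed: B enumerates divisor pairs only up to sqrt(total) (descending co-divisor j, so widths come out in A's ascending order) and replaces A's O(width) inner ring-accumulation loop by solving the closed-form quadratic 2k(w+h)-4k^2 = brown exactly with an integer binary-search square root, O(1) checks per frame.
import Mathlib
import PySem

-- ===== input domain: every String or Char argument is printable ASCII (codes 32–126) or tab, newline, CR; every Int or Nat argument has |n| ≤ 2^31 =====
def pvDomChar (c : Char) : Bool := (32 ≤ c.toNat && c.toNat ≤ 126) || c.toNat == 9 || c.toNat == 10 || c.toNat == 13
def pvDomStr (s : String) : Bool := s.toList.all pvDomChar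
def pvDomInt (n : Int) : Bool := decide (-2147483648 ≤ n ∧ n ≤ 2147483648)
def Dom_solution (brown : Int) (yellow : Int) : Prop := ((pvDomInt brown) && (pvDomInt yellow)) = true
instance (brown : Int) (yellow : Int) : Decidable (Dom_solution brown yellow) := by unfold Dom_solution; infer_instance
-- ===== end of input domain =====

-- B replaces A's O(total) frame scan and O(width) ring loop by divisor enumeration up to
-- sqrt(total) with a closed-form quadratic solve per frame (objective: faster, asymptotic).


-- ===== PORT A =====
def solution (brown : Int) (yellow : Int) : List Int :=
  let total := brown + yellow
  let frames : List (Int × Int) :=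
    (PySem.List.pyRange 3 (PySem.Int.floordiv total 2) 1).foldl
      (fun frames i =>
        if PySem.Int.mod total i = 0 ∧ PySem.Int.floordiv total i ≤ i then
          frames ++ [(i, PySem.Int.floordiv total i)]
        else frames) []
  let answer : List Int :=
    frames.foldl
      (fun answer wh =>
        ((PySem.List.pyRange 0 (PySem.Int.floordiv wh.1 2) 1).foldl
          (fun (st : Int × List Int) i =>
            let bc := st.1 + (2 * (wh.1 - 2 * i) + 2 * (wh.2 - 2 * i) - 4)
            if bc = brown ∧ wh.1 * wh.2 - bc = yellow then
              (bc, st.2 ++ [wh.1, wh.2])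
            else (bc, st.2))
          (0, answer)).2)
      []
  answer

-- ===== PORT B =====
-- Source B's _isqrt: binary search, invariant lo*lo ≤ n < hi*hi
def isqrtGo (n lo hi : Int) : Int :=
  if h : 1 < hi - lo then
    if PySem.Int.floordiv (lo + hi) 2 * PySem.Int.floordiv (lo + hi) 2 ≤ n then
      isqrtGo n (PySem.Int.floordiv (lo + hi) 2) hi
    else
      isqrtGo n lo (PySem.Int.floordiv (lo + hi) 2)
  else lo
termination_by (hi - lo).toNat
decreasing_by
  all_goals
    rw [PySem.Int.floordiv_eq_ediv_of_pos (by norm_num : (0:Int) < 2)]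
    omega

def isqrt (n : Int) : Int := isqrtGo n 0 (n + 1)

-- Source B's _ring_matches: solve 2*k*(w+h) - 4*k*k = brown in closed form
def ringMatches (brown w h : Int) : List Int :=
  let s := w + h
  let disc := s * s - 4 * brown
  if 0 ≤ disc then
    let r := isqrt disc
    if r * r = disc then
      (if 0 < r then [s - r, s + r] else [s - r]).foldl
        (fun out num =>
          if PySem.Int.mod num 4 = 0 then
            if 1 ≤ PySem.Int.floordiv num 4 ∧
                PySem.Int.floordiv num 4 ≤ PySem.Int.floordiv w 2 then
              out ++ [w, h]
            else out
          else out) []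
    else []
  else []

-- Source B's main while-loop over j = isqrt(total) .. 1
def altLoop (brown total half : Int) (j : Int) (answer : List Int) : List Int :=
  if hj : 1 ≤ j then
    let answer' :=
      if PySem.Int.mod total j = 0 then
        let w := PySem.Int.floordiv total j
        if 3 ≤ w ∧ w < half then answer ++ ringMatches brown w j else answer
      else answer
    altLoop brown total half (j - 1) answer'
  else answer
termination_by j.toNat
decreasing_by omega

def solution_alt (brown : Int) (yellow : Int) : List Int :=
  let total := brown + yellow
  if total < 1 then []
  else altLoop brown total (PySem.Int.floordiv total 2) (isqrt total) []

-- ===== PRECONDITION & SPEC =====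
def Spec_solution (brown : Int) (yellow : Int) (out : List Int) : Prop := out = solution_alt brown yellow
instance (brown : Int) (yellow : Int) (out : List Int) : Decidable (Spec_solution brown yellow out) := by unfold Spec_solution; infer_instance

-- ===== CLAIM (what is proved, stated in full; the proofs are below) =====
def Claim_equal_solution : Prop := ∀ (brown : Int) (yellow : Int), Dom_solution brown yellow → Spec_solution brown yellow (solution brown yellow)

-- ===== LEMMAS AND PROOFS =====

-- cumulative brown count of the first k rings of a w × h frame
def cum (w h k : Int) : Int := 2 * k * (w + h) - 4 * k * k

-- canonical per-frame contribution, as A computes it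
def bodyA (brown yellow w h : Int) : List Int :=
  (PySem.List.pyRange 0 (PySem.Int.floordiv w 2) 1).flatMap
    (fun i => if cum w h (i + 1) = brown ∧ w * h - cum w h (i + 1) = yellow then [w, h] else [])

-- canonical per-frame contribution, as B computes it
def rootsB (brown w h : Int) : List Int :=
  let s := w + h
  let disc := s * s - 4 * brown
  if 0 ≤ disc then
    if isqrt disc * isqrt disc = disc then
      (if 0 < isqrt disc then [s - isqrt disc, s + isqrt disc] else [s - isqrt disc]).flatMap
        (fun num =>
          if PySem.Int.mod num 4 = 0 ∧ 1 ≤ PySem.Int.floordiv num 4 ∧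
              PySem.Int.floordiv num 4 ≤ PySem.Int.floordiv w 2 then [w, h] else [])
    else []
  else []

def contribB (brown total half j : Int) : List Int :=
  if PySem.Int.mod total j = 0 then
    if 3 ≤ PySem.Int.floordiv total j ∧ PySem.Int.floordiv total j < half then
      rootsB brown (PySem.Int.floordiv total j) j
    else []
  else []

theorem isqrtGo_spec (n : Int) : ∀ (m : Nat) (lo hi : Int), (hi - lo).toNat = m →
    0 ≤ lo → lo < hi → lo * lo ≤ n → n < hi * hi →
    0 ≤ isqrtGo n lo hi ∧ isqrtGo n lo hi * isqrtGo n lo hi ≤ n ∧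
      n < (isqrtGo n lo hi + 1) * (isqrtGo n lo hi + 1) := by
  intro m
  induction m using Nat.strong_induction_on with
  | _ m ih =>
    intro lo hi hm hlo hlt hlow hhigh
    rw [isqrtGo]
    by_cases h : 1 < hi - lo
    · have hmid : PySem.Int.floordiv (lo + hi) 2 = (lo + hi) / 2 :=
        PySem.Int.floordiv_eq_ediv_of_pos (by norm_num)
      simp only [h, dif_pos]
      have h1 : lo < PySem.Int.floordiv (lo + hi) 2 := by rw [hmid]; omega
      have h2 : PySem.Int.floordiv (lo + hi) 2 < hi := by rw [hmid]; omega
      by_cases hc : PySem.Int.floordiv (lo + hi) 2 * PySem.Int.floordiv (lo + hi) 2 ≤ n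
      · rw [if_pos hc]
        exact ih (hi - PySem.Int.floordiv (lo + hi) 2).toNat (by omega) _ hi rfl (by omega) h2 hc hhigh
      · rw [if_neg hc]
        exact ih (PySem.Int.floordiv (lo + hi) 2 - lo).toNat (by omega) lo _ rfl hlo h1 hlow (by omega)
    · simp only [h, dif_neg, not_false_iff]
      have : hi = lo + 1 := by omega
      refine ⟨hlo, hlow, ?_⟩
      subst this
      simpa using hhigh

theorem isqrt_spec (n : Int) (hn : 0 ≤ n) :
    0 ≤ isqrt n ∧ isqrt n * isqrt n ≤ n ∧ n < (isqrt n + 1) * (isqrt n + 1) := by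
  have := isqrtGo_spec n (n + 1 - 0).toNat 0 (n + 1) rfl le_rfl (by omega) (by simpa) (by nlinarith)
  simpa [isqrt] using this


-- ---------- generic list helpers (shapes of our two programs) ----------

theorem flatMap_map' {α : Type} (l : List Int) (f : Int → α) (g : α → List Int) :
    (l.map f).flatMap g = l.flatMap (fun x => g (f x)) := by
  induction l with
  | nil => rfl
  | cons a t ih => simp [ih]

theorem flatMap_ite_filter (l : List Int) (p : Int → Prop) [DecidablePred p] (F : Int → List Int) :
    l.flatMap (fun x => if p x then F x else []) = (l.filter (fun x => decide (p x))).flatMap F := by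
  induction l with
  | nil => rfl
  | cons a t ih =>
    by_cases h : p a <;> simp [h, ih]

theorem flatMap_blocks (l : List Int) (p : Int → Prop) [DecidablePred p] (v : List Int) :
    l.flatMap (fun i => if p i then v else []) =
      (List.replicate (l.countP (fun i => decide (p i))) v).flatten := by
  induction l with
  | nil => rfl
  | cons a t ih =>
    by_cases h : p a <;> simp [h, ih, List.replicate_succ]

-- ---------- counting the solutions of 4*(i+1) ∈ {c1, c2} in range(0, b) ----------

theorem countP_pair_aux (c1 c2 : Int) (hle : c1 ≤ c2) : ∀ (n : Nat),
    (PySem.List.pyRange 0 (n : Int) 1).countP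
        (fun i => decide (4 * (i + 1) = c1 ∨ 4 * (i + 1) = c2)) =
      (if 4 ∣ c1 ∧ 1 ≤ c1 / 4 ∧ c1 / 4 ≤ (n : Int) then 1 else 0)
        + (if c1 ≠ c2 ∧ 4 ∣ c2 ∧ 1 ≤ c2 / 4 ∧ c2 / 4 ≤ (n : Int) then 1 else 0) := by
  intro n
  induction n with
  | zero =>
    rw [show ((0 : Nat) : Int) = 0 by rfl, PySem.List.pyRange_one_eq_nil (by omega)]
    rw [if_neg (by omega), if_neg (by omega)]
    rfl
  | succ n ih =>
    have hsplit : PySem.List.pyRange 0 ((n + 1 : Nat) : Int) 1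
        = PySem.List.pyRange 0 (n : Int) 1 ++ [(n : Int)] := by
      push_cast
      exact PySem.List.pyRange_one_succ_right (by omega)
    rw [hsplit, List.countP_append, ih, List.countP_cons, List.countP_nil]
    simp only [decide_eq_true_eq]
    by_cases hA : 4 * ((n : Int) + 1) = c1
    · rw [if_pos (Or.inl hA)]
      split_ifs <;> omega
    · by_cases hB : 4 * ((n : Int) + 1) = c2
      · rw [if_pos (Or.inr hB)]
        split_ifs <;> omega
      · rw [if_neg (show ¬(4 * ((n : Int) + 1) = c1 ∨ 4 * ((n : Int) + 1) = c2) from by tauto)]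
        split_ifs <;> omega

theorem flatMap_pair (v : List Int) (c1 c2 b : Int) (hle : c1 ≤ c2) :
    (PySem.List.pyRange 0 b 1).flatMap
        (fun i => if 4 * (i + 1) = c1 ∨ 4 * (i + 1) = c2 then v else [])
      = (if 4 ∣ c1 ∧ 1 ≤ c1 / 4 ∧ c1 / 4 ≤ b then v else [])
        ++ (if c1 ≠ c2 ∧ 4 ∣ c2 ∧ 1 ≤ c2 / 4 ∧ c2 / 4 ≤ b then v else []) := by
  by_cases hb : b ≤ 0
  · rw [PySem.List.pyRange_one_eq_nil (by omega)]
    rw [if_neg (by omega), if_neg (by omega)]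
    rfl
  · obtain ⟨n, hn⟩ : ∃ n : Nat, b = (n : Int) := ⟨b.toNat, by omega⟩
    subst hn
    rw [flatMap_blocks, countP_pair_aux c1 c2 hle n]
    split_ifs <;> simp [List.replicate_succ]

-- ---------- A's inner ring loop ----------

theorem innerA (brown yellow w h : Int) : ∀ (n : Nat) (ans : List Int),
    (PySem.List.pyRange 0 (n : Int) 1).foldl
        (fun (st : Int × List Int) i =>
          if st.1 + (2 * (w - 2 * i) + 2 * (h - 2 * i) - 4) = brown ∧
              w * h - (st.1 + (2 * (w - 2 * i) + 2 * (h - 2 * i) - 4)) = yellow then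
            (st.1 + (2 * (w - 2 * i) + 2 * (h - 2 * i) - 4), st.2 ++ [w, h])
          else (st.1 + (2 * (w - 2 * i) + 2 * (h - 2 * i) - 4), st.2))
        (0, ans)
      = (cum w h (n : Int),
         ans ++ (PySem.List.pyRange 0 (n : Int) 1).flatMap
           (fun i => if cum w h (i + 1) = brown ∧ w * h - cum w h (i + 1) = yellow
             then [w, h] else [])) := by
  intro n
  induction n with
  | zero =>
    intro ans
    rw [show ((0 : Nat) : Int) = 0 by rfl, PySem.List.pyRange_one_eq_nil (by omega)]
    simp [cum]
  | succ n ih =>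
    intro ans
    have hsplit : PySem.List.pyRange 0 ((n + 1 : Nat) : Int) 1
        = PySem.List.pyRange 0 (n : Int) 1 ++ [(n : Int)] := by
      push_cast
      exact PySem.List.pyRange_one_succ_right (by omega)
    rw [hsplit, List.foldl_append, ih ans, List.flatMap_append]
    have hc : cum w h (n : Int) + (2 * (w - 2 * (n : Int)) + 2 * (h - 2 * (n : Int)) - 4)
        = cum w h ((n : Int) + 1) := by unfold cum; ring
    simp only [List.foldl_cons, List.foldl_nil, List.flatMap_cons, List.flatMap_nil]
    rw [hc]
    push_cast
    by_cases hq : cum w h ((n : Int) + 1) = brown ∧ w * h - cum w h ((n : Int) + 1) = yellow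
    · rw [if_pos hq, if_pos hq]; simp
    · rw [if_neg hq, if_neg hq]; simp

theorem innerA_snd (brown yellow : Int) :
    (fun (answer : List Int) (wh : Int × Int) =>
      ((PySem.List.pyRange 0 (PySem.Int.floordiv wh.1 2) 1).foldl
          (fun (st : Int × List Int) i =>
            if st.1 + (2 * (wh.1 - 2 * i) + 2 * (wh.2 - 2 * i) - 4) = brown ∧
                wh.1 * wh.2 - (st.1 + (2 * (wh.1 - 2 * i) + 2 * (wh.2 - 2 * i) - 4)) = yellow then
              (st.1 + (2 * (wh.1 - 2 * i) + 2 * (wh.2 - 2 * i) - 4), st.2 ++ [wh.1, wh.2])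
            else (st.1 + (2 * (wh.1 - 2 * i) + 2 * (wh.2 - 2 * i) - 4), st.2))
          (0, answer)).2)
      = fun answer wh => answer ++ bodyA brown yellow wh.1 wh.2 := by
  funext ans wh
  by_cases hfd : 0 ≤ PySem.Int.floordiv wh.1 2
  · obtain ⟨n, hn⟩ : ∃ n : Nat, PySem.Int.floordiv wh.1 2 = (n : Int) :=
      ⟨(PySem.Int.floordiv wh.1 2).toNat, by omega⟩
    unfold bodyA
    rw [hn, innerA brown yellow wh.1 wh.2 n ans]
  · unfold bodyA
    rw [PySem.List.pyRange_one_eq_nil (by omega)]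
    simp

-- A, normalised: flatMap of the per-frame ring loop over the filtered frame widths
theorem solution_eq (brown yellow : Int) :
    solution brown yellow =
      ((PySem.List.pyRange 3 (PySem.Int.floordiv (brown + yellow) 2) 1).filter
          (fun i => decide (PySem.Int.mod (brown + yellow) i = 0 ∧
            PySem.Int.floordiv (brown + yellow) i ≤ i))).flatMap
        (fun i => bodyA brown yellow i (PySem.Int.floordiv (brown + yellow) i)) := by
  show ((PySem.List.pyRange 3 (PySem.Int.floordiv (brown + yellow) 2) 1).foldl
      (fun frames i =>
        if PySem.Int.mod (brown + yellow) i = 0 ∧ PySem.Int.floordiv (brown + yellow) i ≤ i then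
          frames ++ [(i, PySem.Int.floordiv (brown + yellow) i)]
        else frames) ([] : List (Int × Int))).foldl
      (fun answer wh =>
        ((PySem.List.pyRange 0 (PySem.Int.floordiv wh.1 2) 1).foldl
          (fun (st : Int × List Int) i =>
            if st.1 + (2 * (wh.1 - 2 * i) + 2 * (wh.2 - 2 * i) - 4) = brown ∧
                wh.1 * wh.2 - (st.1 + (2 * (wh.1 - 2 * i) + 2 * (wh.2 - 2 * i) - 4)) = yellow then
              (st.1 + (2 * (wh.1 - 2 * i) + 2 * (wh.2 - 2 * i) - 4), st.2 ++ [wh.1, wh.2])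
            else (st.1 + (2 * (wh.1 - 2 * i) + 2 * (wh.2 - 2 * i) - 4), st.2))
          (0, answer)).2) [] = _
  rw [PySem.List.foldl_append_ite, List.nil_append, innerA_snd brown yellow,
    PySem.List.foldl_append_eq_flatMap, List.nil_append,
    flatMap_map' _ (fun i => (i, PySem.Int.floordiv (brown + yellow) i))
      (fun wh => bodyA brown yellow wh.1 wh.2)]

-- ---------- B's loops, normalised ----------

theorem foldlRoots (w h : Int) (nums ans : List Int) :
    nums.foldl
        (fun ans num =>
          if PySem.Int.mod num 4 = 0 then
            if 1 ≤ PySem.Int.floordiv num 4 ∧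
                PySem.Int.floordiv num 4 ≤ PySem.Int.floordiv w 2 then
              ans ++ [w, h]
            else ans
          else ans) ans
      = ans ++ nums.flatMap
          (fun num =>
            if PySem.Int.mod num 4 = 0 ∧ 1 ≤ PySem.Int.floordiv num 4 ∧
                PySem.Int.floordiv num 4 ≤ PySem.Int.floordiv w 2 then [w, h] else []) := by
  have hf : (fun (ans : List Int) num =>
      if PySem.Int.mod num 4 = 0 then
        if 1 ≤ PySem.Int.floordiv num 4 ∧
            PySem.Int.floordiv num 4 ≤ PySem.Int.floordiv w 2 then ans ++ [w, h] else ans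
      else ans)
      = fun ans num => ans ++ (if PySem.Int.mod num 4 = 0 ∧ 1 ≤ PySem.Int.floordiv num 4 ∧
          PySem.Int.floordiv num 4 ≤ PySem.Int.floordiv w 2 then [w, h] else []) := by
    funext a n
    by_cases h1 : PySem.Int.mod n 4 = 0
    · by_cases h2 : 1 ≤ PySem.Int.floordiv n 4 ∧ PySem.Int.floordiv n 4 ≤ PySem.Int.floordiv w 2
      · rw [if_pos h1, if_pos h2, if_pos ⟨h1, h2⟩]
      · rw [if_pos h1, if_neg h2, if_neg (fun hc => h2 hc.2), List.append_nil]
    · rw [if_neg h1, if_neg (fun hc => h1 hc.1), List.append_nil]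
  rw [hf, PySem.List.foldl_append_eq_flatMap]

theorem ringMatches_eq (brown w h : Int) : ringMatches brown w h = rootsB brown w h := by
  simp only [ringMatches, rootsB]
  split_ifs <;> first | rfl | (rw [foldlRoots]; simp)

theorem altLoop_eq (brown total half : Int) : ∀ (m : Nat) (j : Int), j.toNat = m →
    ∀ (ans : List Int),
    altLoop brown total half j ans
      = ans ++ (PySem.List.pyRange j 0 (-1)).flatMap (contribB brown total half) := by
  intro m
  induction m with
  | zero =>
    intro j hj ans
    rw [altLoop, dif_neg (by omega), PySem.List.pyRange_neg_one_eq_nil (by omega)]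
    simp
  | succ n ih =>
    intro j hj ans
    rw [altLoop, dif_pos (by omega : 1 ≤ j),
      PySem.List.pyRange_neg_one_cons (by omega : (0:Int) < j), List.flatMap_cons]
    rw [ih (j - 1) (by omega)]
    have hbody : (if PySem.Int.mod total j = 0 then
        if 3 ≤ PySem.Int.floordiv total j ∧ PySem.Int.floordiv total j < half then
          ans ++ ringMatches brown (PySem.Int.floordiv total j) j
        else ans
      else ans) = ans ++ contribB brown total half j := by
      unfold contribB
      split_ifs <;> first | (rw [ringMatches_eq]) | simp
    rw [hbody]
    simp

theorem solution_alt_eq (brown yellow : Int) (h1 : ¬ brown + yellow < 1) :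
    solution_alt brown yellow
      = (PySem.List.pyRange (isqrt (brown + yellow)) 0 (-1)).flatMap
          (contribB brown (brown + yellow) (PySem.Int.floordiv (brown + yellow) 2)) := by
  show (if brown + yellow < 1 then [] else
    altLoop brown (brown + yellow) (PySem.Int.floordiv (brown + yellow) 2)
      (isqrt (brown + yellow)) []) = _
  rw [if_neg h1, altLoop_eq _ _ _ (isqrt (brown + yellow)).toNat _ rfl, List.nil_append]

-- divisor complement: T / (T / x) = x  (x a positive divisor with positive co-divisor)
theorem ediv_ediv_cancel (T x : Int) (hx : 0 < x) (hpos : 0 < T / x) (hdvd : x ∣ T) :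
    T / (T / x) = x := by
  obtain ⟨c, hc⟩ := hdvd
  have hc' : T / x = c := by rw [hc, Int.mul_ediv_cancel_left _ (by omega : x ≠ 0)]
  have hcpos : 0 < c := by rw [hc'] at hpos; exact hpos
  rw [hc', hc, mul_comm x c, Int.mul_ediv_cancel_left _ (by omega : c ≠ 0)]

-- ---------- per-frame equivalence: ring loop = quadratic solve ----------

theorem bodyA_eq_rootsB (brown yellow w h : Int) (htot : w * h = brown + yellow) :
    bodyA brown yellow w h = rootsB brown w h := by
  have hQ : ∀ i : Int,
      (cum w h (i + 1) = brown ∧ w * h - cum w h (i + 1) = yellow) ↔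
        (4 * (i + 1) - (w + h)) * (4 * (i + 1) - (w + h)) = (w + h) * (w + h) - 4 * brown := by
    intro i
    unfold cum
    constructor
    · rintro ⟨ha, _⟩
      linear_combination (-4 : Int) * ha
    · intro hsq
      have h4 : 4 * (2 * (i + 1) * (w + h) - 4 * (i + 1) * (i + 1)) = 4 * brown := by
        linear_combination -hsq
      constructor
      · linarith
      · linarith
  have hfun : (fun i => if cum w h (i + 1) = brown ∧ w * h - cum w h (i + 1) = yellow
        then [w, h] else ([] : List Int))
      = fun i => if (4 * (i + 1) - (w + h)) * (4 * (i + 1) - (w + h))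
          = (w + h) * (w + h) - 4 * brown then [w, h] else [] := by
    funext i
    rw [if_congr (hQ i) rfl rfl]
  unfold bodyA rootsB
  rw [hfun]
  by_cases hd : 0 ≤ (w + h) * (w + h) - 4 * brown
  · obtain ⟨hr0, hrle, hrlt⟩ := isqrt_spec _ hd
    set r := isqrt ((w + h) * (w + h) - 4 * brown) with hrdef
    by_cases hsq : r * r = (w + h) * (w + h) - 4 * brown
    · rw [if_pos hd, if_pos hsq]
      have hfun2 : (fun i => if (4 * (i + 1) - (w + h)) * (4 * (i + 1) - (w + h))
            = (w + h) * (w + h) - 4 * brown then [w, h] else ([] : List Int))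
          = fun i => if 4 * (i + 1) = (w + h) - r ∨ 4 * (i + 1) = (w + h) + r
              then [w, h] else [] := by
        funext i
        refine if_congr ?_ rfl rfl
        rw [← hsq, mul_self_eq_mul_self_iff]
        constructor
        · rintro (h1 | h1)
          · right; omega
          · left; omega
        · rintro (h1 | h1)
          · right; omega
          · left; omega
      rw [hfun2, flatMap_pair [w, h] ((w + h) - r) ((w + h) + r)
        (PySem.Int.floordiv w 2) (by omega)]
      by_cases h0 : 0 < r
      · rw [if_pos h0]
        simp only [List.flatMap_cons, List.flatMap_nil, List.append_nil,
          PySem.Int.mod_eq_zero_iff_dvd,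
          PySem.Int.floordiv_eq_ediv_of_pos (by norm_num : (0:Int) < 4)]
        congr 1
        refine if_congr ?_ rfl rfl
        constructor
        · rintro ⟨_, h2⟩; exact h2
        · intro h2; exact ⟨by omega, h2⟩
      · rw [if_neg h0]
        have hr : r = 0 := by omega
        simp only [List.flatMap_cons, List.flatMap_nil, List.append_nil,
          PySem.Int.mod_eq_zero_iff_dvd,
          PySem.Int.floordiv_eq_ediv_of_pos (by norm_num : (0:Int) < 4)]
        rw [if_neg (show ¬(w + h - r ≠ w + h + r ∧ 4 ∣ w + h + r ∧ 1 ≤ (w + h + r) / 4 ∧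
            (w + h + r) / 4 ≤ PySem.Int.floordiv w 2) from fun hc => hc.1 (by omega)),
          List.append_nil]
    · rw [if_pos hd, if_neg hsq, List.flatMap_eq_nil_iff]
      intro i _
      rw [if_neg]
      intro habs
      have h1 : 4 * (i + 1) - (w + h) ≤ r := by nlinarith
      have h2 : -r ≤ 4 * (i + 1) - (w + h) := by nlinarith
      have h3 : (4 * (i + 1) - (w + h)) * (4 * (i + 1) - (w + h)) ≤ r * r := by nlinarith
      exact hsq (by linarith)
  · rw [if_neg hd, List.flatMap_eq_nil_iff]
    intro i _
    rw [if_neg]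
    intro habs
    nlinarith [mul_self_nonneg (4 * (i + 1) - (w + h))]

-- ---------- re-indexing: widths in [3, total//2) ↔ co-divisors in [1, isqrt total] ----------

theorem reindex (brown yellow : Int) (h1 : 1 ≤ brown + yellow) :
    ((PySem.List.pyRange 3 (PySem.Int.floordiv (brown + yellow) 2) 1).filter
        (fun i => decide (PySem.Int.mod (brown + yellow) i = 0 ∧
          PySem.Int.floordiv (brown + yellow) i ≤ i))).flatMap
      (fun i => bodyA brown yellow i (PySem.Int.floordiv (brown + yellow) i))
    = (PySem.List.pyRange (isqrt (brown + yellow)) 0 (-1)).flatMap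
        (contribB brown (brown + yellow) (PySem.Int.floordiv (brown + yellow) 2)) := by
  obtain ⟨hj0, hjle, hjlt⟩ := isqrt_spec (brown + yellow) (by omega)
  set T := brown + yellow with hTdef
  set half := PySem.Int.floordiv T 2 with hhalf
  set jmax := isqrt T with hjmax
  have hjm1 : 1 ≤ jmax := by nlinarith
  have hjmT : jmax ≤ T := by nlinarith
  -- the canonical per-frame function
  set G : Int → List Int := fun w => rootsB brown w (PySem.Int.floordiv T w) with hG
  -- RHS: reverse range, peel the guards
  rw [PySem.List.pyRange_neg_one_eq_reverse]
  have h01 : (0 : Int) + 1 = 1 := by norm_num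
  rw [h01]
  have hcon : ∀ j ∈ (PySem.List.pyRange 1 (jmax + 1) 1).reverse,
      contribB brown T half j
        = if (PySem.Int.mod T j = 0 ∧ 3 ≤ PySem.Int.floordiv T j ∧ PySem.Int.floordiv T j < half)
            then rootsB brown (PySem.Int.floordiv T j) j else [] := by
    intro j _
    unfold contribB
    split_ifs <;> first | rfl | (exfalso; tauto)
  rw [List.flatMap_congr hcon,
    flatMap_ite_filter _ (fun j => (PySem.Int.mod T j = 0 ∧ 3 ≤ PySem.Int.floordiv T j ∧
      PySem.Int.floordiv T j < half)) (fun j => rootsB brown (PySem.Int.floordiv T j) j)]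
  have hmemJ : ∀ j, j ∈ ((PySem.List.pyRange 1 (jmax + 1) 1).reverse.filter
      (fun j => decide (PySem.Int.mod T j = 0 ∧ 3 ≤ PySem.Int.floordiv T j ∧
        PySem.Int.floordiv T j < half)))
      ↔ (1 ≤ j ∧ j ≤ jmax ∧ j ∣ T ∧ 3 ≤ T / j ∧ T / j < half) := by
    intro j
    rw [List.mem_filter, List.mem_reverse, PySem.List.mem_pyRange_one]
    constructor
    · rintro ⟨⟨hlo, hhi⟩, hdec⟩
      rw [decide_eq_true_eq] at hdec
      have hfd : PySem.Int.floordiv T j = T / j :=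
        PySem.Int.floordiv_eq_ediv_of_pos (by omega)
      rw [PySem.Int.mod_eq_zero_iff_dvd, hfd] at hdec
      exact ⟨hlo, by omega, hdec.1, hdec.2.1, hdec.2.2⟩
    · rintro ⟨hlo, hhi, hdvd, hge3, hlthalf⟩
      have hfd : PySem.Int.floordiv T j = T / j :=
        PySem.Int.floordiv_eq_ediv_of_pos (by omega)
      refine ⟨⟨hlo, by omega⟩, ?_⟩
      rw [decide_eq_true_eq, PySem.Int.mod_eq_zero_iff_dvd, hfd]
      exact ⟨hdvd, hge3, hlthalf⟩
  have hfix : ∀ j ∈ ((PySem.List.pyRange 1 (jmax + 1) 1).reverse.filter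
      (fun j => decide (PySem.Int.mod T j = 0 ∧ 3 ≤ PySem.Int.floordiv T j ∧
        PySem.Int.floordiv T j < half))),
      rootsB brown (PySem.Int.floordiv T j) j = G (PySem.Int.floordiv T j) := by
    intro j hj
    obtain ⟨hlo, _, hdvd, hge3, _⟩ := (hmemJ j).mp hj
    have hfd : PySem.Int.floordiv T j = T / j :=
      PySem.Int.floordiv_eq_ediv_of_pos (by omega)
    have hback : PySem.Int.floordiv T (T / j) = j := by
      rw [PySem.Int.floordiv_eq_ediv_of_pos (by omega : (0:Int) < T / j)]
      exact ediv_ediv_cancel T j (by omega) (by omega) hdvd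
    rw [hG]
    show rootsB brown (PySem.Int.floordiv T j) j
      = rootsB brown (PySem.Int.floordiv T j) (PySem.Int.floordiv T (PySem.Int.floordiv T j))
    rw [hfd, hback]
  rw [List.flatMap_congr hfix, ← flatMap_map' _ (fun j => PySem.Int.floordiv T j) G]
  -- LHS: per-frame rewrite to G
  have hmemW : ∀ x, x ∈ ((PySem.List.pyRange 3 half 1).filter
      (fun i => decide (PySem.Int.mod T i = 0 ∧ PySem.Int.floordiv T i ≤ i)))
      ↔ (3 ≤ x ∧ x < half ∧ x ∣ T ∧ T / x ≤ x) := by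
    intro x
    rw [List.mem_filter, PySem.List.mem_pyRange_one]
    constructor
    · rintro ⟨⟨hlo, hhi⟩, hdec⟩
      rw [decide_eq_true_eq] at hdec
      have hfd : PySem.Int.floordiv T x = T / x :=
        PySem.Int.floordiv_eq_ediv_of_pos (by omega)
      rw [PySem.Int.mod_eq_zero_iff_dvd, hfd] at hdec
      exact ⟨hlo, hhi, hdec.1, hdec.2⟩
    · rintro ⟨hlo, hhi, hdvd, hle⟩
      have hfd : PySem.Int.floordiv T x = T / x :=
        PySem.Int.floordiv_eq_ediv_of_pos (by omega)
      refine ⟨⟨hlo, hhi⟩, ?_⟩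
      rw [decide_eq_true_eq, PySem.Int.mod_eq_zero_iff_dvd, hfd]
      exact ⟨hdvd, hle⟩
  have hbody : ∀ i ∈ ((PySem.List.pyRange 3 half 1).filter
      (fun i => decide (PySem.Int.mod T i = 0 ∧ PySem.Int.floordiv T i ≤ i))),
      bodyA brown yellow i (PySem.Int.floordiv T i) = G i := by
    intro i hi
    obtain ⟨hlo, _, hdvd, _⟩ := (hmemW i).mp hi
    have hfd : PySem.Int.floordiv T i = T / i :=
      PySem.Int.floordiv_eq_ediv_of_pos (by omega)
    have hmul : T / i * i = T := Int.ediv_mul_cancel hdvd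
    rw [hG]
    exact bodyA_eq_rootsB brown yellow i (PySem.Int.floordiv T i)
      (by rw [hfd]; rw [hTdef] at hmul ⊢; linarith)
  rw [List.flatMap_congr hbody]
  -- it remains to see that the two index lists are the same
  congr 1
  -- sortedness of both lists
  have hsW : ((PySem.List.pyRange 3 half 1).filter
      (fun i => decide (PySem.Int.mod T i = 0 ∧ PySem.Int.floordiv T i ≤ i))).Pairwise (· < ·) :=
    List.Pairwise.filter _ (PySem.List.pairwise_lt_pyRange_one 3 half)
  have hsJrev : ((PySem.List.pyRange 1 (jmax + 1) 1).reverse).Pairwise (· > ·) := by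
    rw [List.pairwise_reverse]
    exact PySem.List.pairwise_lt_pyRange_one 1 (jmax + 1)
  have hsJfil := List.Pairwise.filter
      (fun j => decide (PySem.Int.mod T j = 0 ∧ 3 ≤ PySem.Int.floordiv T j ∧
        PySem.Int.floordiv T j < half)) hsJrev
  have hsM : (((PySem.List.pyRange 1 (jmax + 1) 1).reverse.filter
      (fun j => decide (PySem.Int.mod T j = 0 ∧ 3 ≤ PySem.Int.floordiv T j ∧
        PySem.Int.floordiv T j < half))).map (fun j => PySem.Int.floordiv T j)).Pairwise (· < ·) := by
    rw [List.pairwise_map]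
    refine List.Pairwise.imp_of_mem ?_ hsJfil
    intro a b ha hb hab
    obtain ⟨ha1, ha2, hadvd, _, _⟩ := (hmemJ a).mp ha
    obtain ⟨hb1, hb2, hbdvd, _, _⟩ := (hmemJ b).mp hb
    have hfa : PySem.Int.floordiv T a = T / a := PySem.Int.floordiv_eq_ediv_of_pos (by omega)
    have hfb : PySem.Int.floordiv T b = T / b := PySem.Int.floordiv_eq_ediv_of_pos (by omega)
    have hma : T / a * a = T := Int.ediv_mul_cancel hadvd
    have hmb : T / b * b = T := Int.ediv_mul_cancel hbdvd
    have hta : 1 ≤ T / a := by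
      rw [Int.le_ediv_iff_mul_le (by omega : (0:Int) < a)]
      nlinarith
    rw [hfa, hfb]
    by_contra hc
    push_neg at hc
    nlinarith
  -- same members
  have hiff : ∀ x, x ∈ ((PySem.List.pyRange 3 half 1).filter
      (fun i => decide (PySem.Int.mod T i = 0 ∧ PySem.Int.floordiv T i ≤ i)))
      ↔ x ∈ (((PySem.List.pyRange 1 (jmax + 1) 1).reverse.filter
        (fun j => decide (PySem.Int.mod T j = 0 ∧ 3 ≤ PySem.Int.floordiv T j ∧
          PySem.Int.floordiv T j < half))).map (fun j => PySem.Int.floordiv T j)) := by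
    intro x
    rw [hmemW, List.mem_map]
    constructor
    · rintro ⟨hlo, hhi, hdvd, hle⟩
      refine ⟨T / x, ?_, ?_⟩
      · rw [hmemJ]
        have hmul : T / x * x = T := Int.ediv_mul_cancel hdvd
        have hj1 : 1 ≤ T / x := by
          rw [Int.le_ediv_iff_mul_le (by omega : (0:Int) < x)]
          have h2 : half ≤ T := by
            rw [hhalf, PySem.Int.floordiv_eq_ediv_of_pos (by norm_num : (0:Int) < 2)]
            omega
          omega
        have hjdvd : T / x ∣ T := Dvd.intro x (by linarith)
        have hback : T / (T / x) = x := ediv_ediv_cancel T x (by omega) (by omega) hdvd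
        have hjj : T / x * (T / x) ≤ T := by nlinarith
        have hjmaxle : T / x ≤ jmax := by nlinarith
        rw [hback]
        exact ⟨hj1, hjmaxle, hjdvd, by omega, hhi⟩
      · have hmul : T / x * x = T := Int.ediv_mul_cancel hdvd
        have hj1 : 1 ≤ T / x := by
          rw [Int.le_ediv_iff_mul_le (by omega : (0:Int) < x)]
          have h2 : half ≤ T := by
            rw [hhalf, PySem.Int.floordiv_eq_ediv_of_pos (by norm_num : (0:Int) < 2)]
            omega
          omega
        rw [PySem.Int.floordiv_eq_ediv_of_pos (by omega : (0:Int) < T / x)]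
        exact ediv_ediv_cancel T x (by omega) (by omega) hdvd
    · rintro ⟨j, hj, hje⟩
      obtain ⟨hj1, hj2, hdvd, hge3, hlthalf⟩ := (hmemJ j).mp hj
      have hfd : PySem.Int.floordiv T j = T / j := PySem.Int.floordiv_eq_ediv_of_pos (by omega)
      rw [hfd] at hje
      subst hje
      have hmul : T / j * j = T := Int.ediv_mul_cancel hdvd
      have hxdvd : T / j ∣ T := Dvd.intro j (by linarith)
      have hjj : j * j ≤ T := by nlinarith
      have hjlex : j ≤ T / j := by nlinarith
      have hback : T / (T / j) = j := ediv_ediv_cancel T j (by omega) (by omega) hdvd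
      exact ⟨hge3, hlthalf, hxdvd, by omega⟩
  have hnd1 := List.Pairwise.imp (fun {a b} (h : a < b) => ne_of_lt h) hsW
  have hnd2 := List.Pairwise.imp (fun {a b} (h : a < b) => ne_of_lt h) hsM
  haveI : Std.Antisymm (fun (a b : Int) => a < b) :=
    ⟨fun a b h1 h2 => absurd h1 (lt_asymm h2)⟩
  exact List.Perm.eq_of_pairwise' hsW hsM ((List.perm_ext_iff_of_nodup hnd1 hnd2).mpr hiff)

-- ===== VERDICT (by name: the statement is the Claim_ definition above) =====
theorem solution_spec : Claim_equal_solution := by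
  intro brown yellow _dom
  unfold Spec_solution
  by_cases hlt : brown + yellow < 1
  · rw [solution_eq]
    have h2 : PySem.Int.floordiv (brown + yellow) 2 = (brown + yellow) / 2 :=
      PySem.Int.floordiv_eq_ediv_of_pos (by norm_num)
    rw [PySem.List.pyRange_one_eq_nil (by rw [h2]; omega)]
    show ([] : List Int) = (if brown + yellow < 1 then [] else _)
    rw [if_pos hlt]
  · rw [solution_eq, reindex brown yellow (by omega), solution_alt_eq brown yellow hlt]
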